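-- pv_equiv track=rewrite | github.com/Druneau/aoc2024 | day14/day14.py | scan_map_sequential_robots
-- ===== SOURCE A (Python) =====
-- from itertools import groupby
--
-- def longest_streak_robots(chars):
--     if "O" not in chars:
--         return ("O", 0)
--     return max(
--         (
--             (char, sum(1 for _ in group))
--             for char, group in groupby(chars)
--             if char == "O"
--         ),
--         key=lambda x: x[1],
--     )
--
-- def scan_map_sequential_robots(locations, map_size, seconds):
--     unique_locations = set(locations)
--     size_x, size_y = map_size
--
--     # we're gonna try to find straight lines with lots of robots...
--     # should probably find a more direct way.. but this worked!
--
--     max_sequential_robots_in_row = 0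
--
--     for y in range(size_y):
--         row = []
--         for x in range(size_x):
--             if (x, y) in unique_locations:
--                 row.append("O")
--             else:
--                 row.append(".")
--         max_sequential_robots_in_row = max(
--             max_sequential_robots_in_row, longest_streak_robots(row)[1]
--         )
--     return max_sequential_robots_in_row
-- ===== SOURCE B (Python) =====
-- def scan_map_sequential_robots(locations, map_size, seconds):
--     size_x, size_y = map_size
--     # group robot x-coordinates by row (only rows inside the map), then
--     # run a single run-length counter over each occupied row only
--     rows = {}
--     for x, y in locations:
--         if 0 <= y < size_y:
--             s = rows.get(y, set())
--             s.add(x)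
--             rows[y] = s
--     best = 0
--     for xs in rows.values():
--         cur = 0
--         for x in range(size_x):
--             cur = cur + 1 if x in xs else 0
--             if cur > best:
--                 best = cur
--     return best
-- ===== Notes on version B (the rewrite author's own statement) =====
-- stated objective: faster
-- what changed: B groups robot x-coordinates by row in one pass over the robot list and runs an integer run-length counter over occupied rows only, instead of materialising a character row for every y in the map and feeding it to itertools.groupby/max.
import Mathlib
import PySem

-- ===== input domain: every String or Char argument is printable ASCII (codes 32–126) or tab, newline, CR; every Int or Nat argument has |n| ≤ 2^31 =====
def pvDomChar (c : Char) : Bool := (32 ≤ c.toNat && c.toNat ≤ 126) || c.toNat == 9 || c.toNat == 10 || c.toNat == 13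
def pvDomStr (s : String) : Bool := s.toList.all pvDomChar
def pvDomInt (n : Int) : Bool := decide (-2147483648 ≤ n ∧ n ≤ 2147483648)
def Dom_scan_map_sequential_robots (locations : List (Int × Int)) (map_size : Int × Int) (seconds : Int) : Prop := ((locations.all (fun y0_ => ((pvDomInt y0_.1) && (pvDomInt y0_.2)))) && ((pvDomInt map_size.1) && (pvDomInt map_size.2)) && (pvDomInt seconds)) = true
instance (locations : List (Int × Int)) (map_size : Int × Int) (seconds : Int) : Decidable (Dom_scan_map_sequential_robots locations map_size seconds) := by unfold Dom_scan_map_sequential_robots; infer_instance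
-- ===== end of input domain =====

-- B groups robot x-coordinates by row and run-length-scans occupied rows only, instead of
-- rendering a character row for every y and running groupby/max over it (objective: faster).


-- ===== PORT A =====
-- itertools.groupby over the row's one-char strings: (key, group) runs, in order
def pvGroupby (l : List String) : List (String × List String) :=
  match l with
  | [] => []
  | c :: rest =>
    (c, c :: rest.takeWhile (· == c)) :: pvGroupby (rest.dropWhile (· == c))
termination_by l.length
decreasing_by
  simp only [List.length_cons]
  have := List.length_dropWhile_le (· == c) rest
  omega

def longest_streak_robots (chars : List String) : String × Int :=
  if ¬ chars.contains "O" then ("O", 0)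
  else
    match (pvGroupby chars).filterMap
        (fun g => if g.1 == "O" then some (g.1, (g.2.length : Int)) else none) with
    | [] => ("O", 0)
    | p :: ps => ps.foldl (fun best q => if best.2 < q.2 then q else best) p

def scan_map_sequential_robots (locations : List (Int × Int)) (map_size : Int × Int) (seconds : Int) : Int :=
  let unique_locations : PySem.Set (Int × Int) := PySem.Set.ofList locations
  let size_x := map_size.1
  let size_y := map_size.2
  (PySem.List.pyRange 0 size_y 1).foldl (fun acc y =>
    let row := (PySem.List.pyRange 0 size_x 1).map
      (fun x => if (x, y) ∈ unique_locations then "O" else ".")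
    max acc (longest_streak_robots row).2) 0

-- ===== PORT B =====
def scan_map_sequential_robots_alt (locations : List (Int × Int)) (map_size : Int × Int) (seconds : Int) : Int :=
  let size_x := map_size.1
  let size_y := map_size.2
  let rows : PySem.Dict Int (PySem.Set Int) :=
    locations.foldl (fun d p =>
      if 0 ≤ p.2 ∧ p.2 < size_y then
        d.insert p.2 (PySem.Set.add (d.getD p.2 PySem.Set.empty) p.1)
      else d) PySem.Dict.empty
  rows.values.foldl (fun best xs =>
    ((PySem.List.pyRange 0 size_x 1).foldl (fun st x =>
      let cur : Int := if x ∈ xs then st.2 + 1 else 0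
      (if st.1 < cur then cur else st.1, cur)) (best, 0)).1) 0

-- ===== PRECONDITION & SPEC =====
def Spec_scan_map_sequential_robots (locations : List (Int × Int)) (map_size : Int × Int) (seconds : Int) (out : Int) : Prop := out = scan_map_sequential_robots_alt locations map_size seconds
instance (locations : List (Int × Int)) (map_size : Int × Int) (seconds : Int) (out : Int) : Decidable (Spec_scan_map_sequential_robots locations map_size seconds out) := by unfold Spec_scan_map_sequential_robots; infer_instance

-- ===== CLAIM (what is proved, stated in full; the proofs are below) =====
def Claim_equal_scan_map_sequential_robots : Prop := ∀ (locations : List (Int × Int)) (map_size : Int × Int) (seconds : Int), Dom_scan_map_sequential_robots locations map_size seconds → Spec_scan_map_sequential_robots locations map_size seconds (scan_map_sequential_robots locations map_size seconds)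

-- ===== LEMMAS AND PROOFS =====

def pvInd (b : Bool) : String := if b then "O" else "."
def pvCounts : List Bool → List Int
  | [] => []
  | false :: bs => pvCounts bs
  | true :: bs => (((bs.takeWhile (fun b => b)).length + 1 : Nat) : Int) :: pvCounts (bs.dropWhile (fun b => b))
termination_by l => l.length
decreasing_by
  all_goals
    have := List.length_dropWhile_le (fun b => b) bs
    simp only [List.length_cons]
    omega

def pvG : Int → List Bool → Int
  | _, [] => 0
  | cur, true :: bs => max (cur + 1) (pvG (cur + 1) bs)
  | _, false :: bs => max 0 (pvG 0 bs)

theorem pvG_nonneg (cur : Int) (bs : List Bool) : 0 ≤ pvG cur bs := by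
  induction bs generalizing cur with
  | nil => simp [pvG]
  | cons b bs ih =>
    cases b
    · exact le_max_left 0 _
    · exact le_max_of_le_right (ih (cur + 1))

theorem pv_foldl_max_max (l : List Int) (a b : Int) :
    l.foldl max (max a b) = max a (l.foldl max b) := by
  induction l generalizing b with
  | nil => rfl
  | cons c l ih => simp only [List.foldl_cons]; rw [max_assoc, ih]

theorem pv_foldl_max_le (l : List Int) (c : Int) (h : ∀ v ∈ l, v ≤ c) : l.foldl max c = c := by
  induction l generalizing c with
  | nil => rfl
  | cons v l ih =>
    simp only [List.foldl_cons]
    rw [max_eq_left (h v (by simp))]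
    exact ih c (fun w hw => h w (by simp [hw]))

theorem pvG_false (bs : List Bool) (h : ∀ b ∈ bs, b = false) : pvG 0 bs = 0 := by
  induction bs with
  | nil => rfl
  | cons b bs ih =>
    have hb := h b (by simp)
    subst hb
    show max 0 (pvG 0 bs) = 0
    rw [ih (fun w hw => h w (by simp [hw])), max_self]

theorem pvG_trues (k : Nat) (cur : Int) (rest : List Bool) :
    pvG cur (List.replicate (k + 1) true ++ rest) = max (cur + k + 1) (pvG (cur + k + 1) rest) := by
  induction k generalizing cur with
  | zero => simp [List.replicate, pvG]
  | succ k ih =>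
    show pvG cur (true :: (List.replicate (k + 1) true ++ rest)) = _
    show max (cur + 1) (pvG (cur + 1) (List.replicate (k + 1) true ++ rest)) = _
    rw [ih (cur + 1)]
    have harg : cur + 1 + (k : Int) + 1 = cur + ((k + 1 : Nat) : Int) + 1 := by push_cast; ring
    rw [harg]
    exact max_eq_right (le_max_of_le_left (by push_cast; omega))
theorem pvCounts_nonneg (bs : List Bool) (v : Int) (h : v ∈ pvCounts bs) : 0 ≤ v := by
  fun_induction pvCounts bs with
  | case1 => simp at h
  | case2 bs ih => exact ih h
  | case3 bs ih =>
    rcases List.mem_cons.mp h with h1 | h2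
    · subst h1; positivity
    · exact ih h2

theorem pvCounts_nil (bs : List Bool) (h : ∀ b ∈ bs, b = false) : pvCounts bs = [] := by
  induction bs with
  | nil => simp [pvCounts]
  | cons b bs ih =>
    have hb := h b (by simp)
    subst hb
    rw [show pvCounts (false :: bs) = pvCounts bs from by simp [pvCounts]]
    exact ih (fun w hw => h w (by simp [hw]))

theorem pvCounts_ne_nil (bs : List Bool) (h : true ∈ bs) : pvCounts bs ≠ [] := by
  fun_induction pvCounts bs with
  | case1 => simp at h
  | case2 bs ih => exact ih (by simpa using h)
  | case3 bs ih => simp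

theorem pvG_eq_counts (bs : List Bool) : pvG 0 bs = (pvCounts bs).foldl max 0 := by
  fun_induction pvCounts bs with
  | case1 => rfl
  | case2 bs ih =>
    show max 0 (pvG 0 bs) = _
    rw [max_eq_right (pvG_nonneg 0 bs), ih]
  | case3 bs ih =>
    have hT : bs.takeWhile (fun b => b) = List.replicate (bs.takeWhile (fun b => b)).length true := by
      rw [List.eq_replicate_iff]
      exact ⟨rfl, fun b hb => List.mem_takeWhile_imp hb⟩
    have hbs : true :: bs
        = List.replicate ((bs.takeWhile (fun b => b)).length + 1) true ++ bs.dropWhile (fun b => b) := by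
      rw [List.replicate_succ, List.cons_append]
      conv_lhs => rw [← List.takeWhile_append_dropWhile (p := fun b => b) (l := bs)]
      rw [← hT]
    have hD : ∀ c : Int, pvG c (bs.dropWhile (fun b => b)) = pvG 0 (bs.dropWhile (fun b => b)) := by
      intro c
      cases hd : bs.dropWhile (fun b => b) with
      | nil => rfl
      | cons x t =>
        have hx : x = false := by
          have hne : bs.dropWhile (fun b => b) ≠ [] := by rw [hd]; simp
          have := List.head_dropWhile_not (fun b => b) hne
          simp [hd] at this
          exact this
        subst hx; rfl
    rw [hbs, pvG_trues]
    simp only [List.foldl_cons]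
    rw [max_comm 0, pv_foldl_max_max, ← ih, hD]
    congr 1
    push_cast; ring

theorem pvCounts_dropFalse (bs : List Bool) :
    pvCounts (bs.dropWhile (fun b => !b)) = pvCounts bs := by
  induction bs with
  | nil => simp
  | cons b bs ih =>
    cases b
    · rw [show (false :: bs).dropWhile (fun b => !b) = bs.dropWhile (fun b => !b) from by
        simp]
      rw [ih]
      simp [pvCounts]
    · simp

theorem pv_gc_aux (n : Nat) : ∀ (bs : List Bool), bs.length ≤ n →
    ((pvGroupby (bs.map pvInd)).filterMap
      (fun g => if g.1 == "O" then some (g.1, (g.2.length : Int)) else none)).map (·.2)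
    = pvCounts bs := by
  induction n with
  | zero =>
    intro bs h
    have : bs = [] := by cases bs <;> simp_all
    subst this
    simp [pvGroupby, pvCounts]
  | succ n ih =>
    intro bs h
    match bs with
    | [] => simp [pvGroupby, pvCounts]
    | false :: bs' =>
      have h1 : (false :: bs').map pvInd = "." :: bs'.map pvInd := by simp [pvInd]
      rw [h1, pvGroupby]
      have h2 : (bs'.map pvInd).dropWhile (· == ".") = (bs'.dropWhile (fun b => !b)).map pvInd := by
        rw [List.dropWhile_map]
        rw [show ((fun x => x == ".") ∘ pvInd) = (fun b : Bool => !b) from by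
          funext b; cases b <;> rfl]
      simp only [List.filterMap_cons, h2, show (("." : String) == "O") = false from rfl,
        Bool.false_eq_true, if_false]
      rw [ih _ (le_trans (List.length_dropWhile_le _ _) (by simpa using h)),
        pvCounts_dropFalse]
      simp [pvCounts]
    | true :: bs' =>
      have h1 : (true :: bs').map pvInd = "O" :: bs'.map pvInd := by simp [pvInd]
      rw [h1, pvGroupby]
      have h2 : (bs'.map pvInd).dropWhile (· == "O") = (bs'.dropWhile (fun b => b)).map pvInd := by
        rw [List.dropWhile_map]
        rw [show ((fun x => x == "O") ∘ pvInd) = (fun b : Bool => b) from by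
          funext b; cases b <;> rfl]
      have h3 : (bs'.map pvInd).takeWhile (· == "O") = (bs'.takeWhile (fun b => b)).map pvInd := by
        rw [List.takeWhile_map]
        rw [show ((fun x => x == "O") ∘ pvInd) = (fun b : Bool => b) from by
          funext b; cases b <;> rfl]
      simp only [List.filterMap_cons, h2, h3, show (("O" : String) == "O") = true from rfl,
        if_true]
      simp only [List.map_cons]
      rw [ih _ (le_trans (List.length_dropWhile_le _ _) (by simpa using h))]
      rw [show pvCounts (true :: bs')
          = (((bs'.takeWhile (fun b => b)).length + 1 : Nat) : Int) :: pvCounts (bs'.dropWhile (fun b => b)) from by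
        simp [pvCounts]]
      simp

theorem pv_groupby_counts (bs : List Bool) :
    ((pvGroupby (bs.map pvInd)).filterMap
      (fun g => if g.1 == "O" then some (g.1, (g.2.length : Int)) else none)).map (·.2)
    = pvCounts bs := pv_gc_aux bs.length bs le_rfl



theorem pv_maxfold_snd (ps : List (String × Int)) (p : String × Int) :
    (ps.foldl (fun best q => if best.2 < q.2 then q else best) p).2
    = (ps.map (·.2)).foldl max p.2 := by
  induction ps generalizing p with
  | nil => rfl
  | cons q ps ih =>
    simp only [List.foldl_cons, List.map_cons]
    rw [ih]
    congr 1
    split_ifs with h <;> omega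

theorem pv_streak (bs : List Bool) :
    (longest_streak_robots (bs.map pvInd)).2 = (pvCounts bs).foldl max 0 := by
  by_cases hT : true ∈ bs
  · have hmem : "O" ∈ bs.map pvInd := List.mem_map.mpr ⟨true, hT, rfl⟩
    unfold longest_streak_robots
    rw [if_neg (not_not_intro (List.elem_eq_true_of_mem hmem))]
    cases hp : (pvGroupby (bs.map pvInd)).filterMap
        (fun g => if g.1 == "O" then some (g.1, (g.2.length : Int)) else none) with
    | nil =>
      exfalso
      have hm := pv_groupby_counts bs
      rw [hp] at hm
      exact pvCounts_ne_nil bs hT hm.symm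
    | cons p ps =>
      rw [pv_maxfold_snd]
      have hm := pv_groupby_counts bs
      rw [hp] at hm
      simp only [List.map_cons] at hm
      rw [← hm]
      simp only [List.foldl_cons]
      have hp2 : 0 ≤ p.2 := pvCounts_nonneg bs _ (by rw [← hm]; simp)
      rw [max_comm 0 p.2, max_eq_left hp2]
  · have h0 : ∀ b ∈ bs, b = false := by
      intro b hb
      cases b
      · rfl
      · exact absurd hb hT
    unfold longest_streak_robots
    rw [if_pos]
    · rw [pvCounts_nil bs h0]
      rfl
    · intro hc
      rcases List.mem_map.mp (List.mem_of_elem_eq_true hc) with ⟨b, hb, hpb⟩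
      have := h0 b hb
      subst this
      simp [pvInd] at hpb

theorem pv_innerB (xs : List Int) (l : List Int) (best cur : Int) (hb : 0 ≤ best) :
    (l.foldl (fun st x =>
      let c : Int := if x ∈ xs then st.2 + 1 else 0
      (if st.1 < c then c else st.1, c)) (best, cur)).1
    = max best (pvG cur (l.map (fun x => decide (x ∈ xs)))) := by
  induction l generalizing best cur with
  | nil => exact (max_eq_left hb).symm
  | cons x l ih =>
    simp only [List.foldl_cons, List.map_cons]
    by_cases hx : x ∈ xs
    · rw [if_pos hx, show decide (x ∈ xs) = true from by simp [hx]]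
      rw [show (if best < cur + 1 then cur + 1 else best) = max best (cur + 1) from by
        rw [max_def]; split_ifs <;> omega]
      rw [ih _ _ (le_trans hb (le_max_left _ _))]
      show max (max best (cur + 1)) _ = max best (pvG cur (true :: _))
      rw [max_assoc]
      rfl
    · rw [if_neg hx, show decide (x ∈ xs) = false from by simp [hx]]
      rw [show (if best < (0:Int) then (0:Int) else best) = best from by omega]
      rw [ih _ _ hb]
      show max best _ = max best (pvG cur (false :: _))
      congr 1
      show pvG 0 _ = max 0 (pvG 0 _)
      rw [max_eq_right (pvG_nonneg _ _)]

def pvStep (sy : Int) (d : PySem.Dict Int (PySem.Set Int)) (p : Int × Int) :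
    PySem.Dict Int (PySem.Set Int) :=
  if 0 ≤ p.2 ∧ p.2 < sy then
    d.insert p.2 (PySem.Set.add (d.getD p.2 PySem.Set.empty) p.1)
  else d

theorem pvRows_nodup (sy : Int) (l : List (Int × Int)) (d : PySem.Dict Int (PySem.Set Int))
    (h : d.keys.Nodup) : (l.foldl (pvStep sy) d).keys.Nodup := by
  induction l generalizing d with
  | nil => exact h
  | cons p l ih =>
    simp only [List.foldl_cons]
    apply ih
    unfold pvStep
    split_ifs
    · exact PySem.Dict.nodup_keys_insert _ _ _ h
    · exact h

theorem pvRows_keys (sy : Int) (l : List (Int × Int)) (d : PySem.Dict Int (PySem.Set Int))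
    (y : Int) : y ∈ (l.foldl (pvStep sy) d).keys ↔
      y ∈ d.keys ∨ (0 ≤ y ∧ y < sy ∧ ∃ x, (x, y) ∈ l) := by
  induction l generalizing d with
  | nil => simp
  | cons p l ih =>
    obtain ⟨a, b⟩ := p
    simp only [List.foldl_cons]
    rw [ih]
    unfold pvStep
    by_cases hc : 0 ≤ b ∧ b < sy
    · rw [if_pos hc]
      rw [PySem.Dict.mem_keys_insert]
      constructor
      · rintro ((rfl | hk) | ⟨h0, h1, x, hx⟩)
        · exact Or.inr ⟨hc.1, hc.2, a, by simp⟩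
        · exact Or.inl hk
        · exact Or.inr ⟨h0, h1, x, List.mem_cons_of_mem _ hx⟩
      · rintro (hk | ⟨h0, h1, x, hx⟩)
        · exact Or.inl (Or.inr hk)
        · rcases List.mem_cons.mp hx with heq | hmem
          · exact Or.inl (Or.inl (congrArg Prod.snd heq))
          · exact Or.inr ⟨h0, h1, x, hmem⟩
    · rw [if_neg hc]
      constructor
      · rintro (hk | ⟨h0, h1, x, hx⟩)
        · exact Or.inl hk
        · exact Or.inr ⟨h0, h1, x, List.mem_cons_of_mem _ hx⟩
      · rintro (hk | ⟨h0, h1, x, hx⟩)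
        · exact Or.inl hk
        · rcases List.mem_cons.mp hx with heq | hmem
          · exfalso
            have hb : y = b := congrArg Prod.snd heq
            exact hc ⟨hb ▸ h0, hb ▸ h1⟩
          · exact Or.inr ⟨h0, h1, x, hmem⟩

theorem pvRows_mem (sy : Int) (l : List (Int × Int)) (d : PySem.Dict Int (PySem.Set Int))
    (y x : Int) (h0 : 0 ≤ y) (h1 : y < sy) :
    x ∈ (l.foldl (pvStep sy) d).getD y PySem.Set.empty ↔
      x ∈ d.getD y PySem.Set.empty ∨ (x, y) ∈ l := by
  induction l generalizing d with
  | nil => simp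
  | cons p l ih =>
    obtain ⟨a, b⟩ := p
    simp only [List.foldl_cons]
    rw [ih]
    unfold pvStep
    by_cases hc : 0 ≤ b ∧ b < sy
    · rw [if_pos hc]
      rw [PySem.Dict.getD_insert]
      by_cases hyb : y = b
      · subst hyb
        rw [if_pos rfl, PySem.Set.mem_add]
        constructor
        · rintro ((hs | rfl) | hl)
          · exact Or.inl hs
          · exact Or.inr (by simp)
          · exact Or.inr (List.mem_cons_of_mem _ hl)
        · rintro (hs | hl)
          · exact Or.inl (Or.inl hs)
          · rcases List.mem_cons.mp hl with heq | hmem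
            · exact Or.inl (Or.inr (congrArg Prod.fst heq))
            · exact Or.inr hmem
      · rw [if_neg hyb]
        constructor
        · rintro (hs | hl)
          · exact Or.inl hs
          · exact Or.inr (List.mem_cons_of_mem _ hl)
        · rintro (hs | hl)
          · exact Or.inl hs
          · rcases List.mem_cons.mp hl with heq | hmem
            · exact absurd (congrArg Prod.snd heq) hyb
            · exact Or.inr hmem
    · rw [if_neg hc]
      constructor
      · rintro (hs | hl)
        · exact Or.inl hs
        · exact Or.inr (List.mem_cons_of_mem _ hl)
      · rintro (hs | hl)
        · exact Or.inl hs
        · rcases List.mem_cons.mp hl with heq | hmem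
          · exfalso
            have hb : y = b := congrArg Prod.snd heq
            exact hc ⟨hb ▸ h0, hb ▸ h1⟩
          · exact Or.inr hmem

theorem pv_outerB (sx : Int) (vals : List (PySem.Set Int)) (best : Int) (hb : 0 ≤ best) :
    vals.foldl (fun best xs =>
      ((PySem.List.pyRange 0 sx 1).foldl (fun st x =>
        let cur : Int := if x ∈ xs then st.2 + 1 else 0
        (if st.1 < cur then cur else st.1, cur)) (best, 0)).1) best
    = (vals.map (fun xs =>
        pvG 0 ((PySem.List.pyRange 0 sx 1).map (fun x => decide (x ∈ xs))))).foldl max best := by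
  induction vals generalizing best with
  | nil => rfl
  | cons xs vals ih =>
    simp only [List.foldl_cons, List.map_cons]
    rw [pv_innerB xs _ best 0 hb]
    exact ih _ (le_trans hb (le_max_left _ _))



def pvF (locations : List (Int × Int)) (sx : Int) (y : Int) : Int :=
  pvG 0 ((PySem.List.pyRange 0 sx 1).map (fun x => decide ((x, y) ∈ locations)))

def pvGv (sx : Int) (xs : PySem.Set Int) : Int :=
  pvG 0 ((PySem.List.pyRange 0 sx 1).map (fun x => decide (x ∈ xs)))

theorem pvA_eq (locations : List (Int × Int)) (sx sy seconds : Int) :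
    scan_map_sequential_robots locations (sx, sy) seconds
    = ((PySem.List.pyRange 0 sy 1).map (pvF locations sx)).foldl max 0 := by
  simp only [scan_map_sequential_robots]
  rw [List.foldl_map]
  congr 1
  funext acc y
  congr 1
  have hch : (PySem.List.pyRange 0 sx 1).map
        (fun x => if (x, y) ∈ PySem.Set.ofList locations then "O" else ".")
      = ((PySem.List.pyRange 0 sx 1).map (fun x => decide ((x, y) ∈ locations))).map pvInd := by
    rw [List.map_map]
    apply List.map_congr_left
    intro x _
    by_cases h : (x, y) ∈ locations
    · simp [PySem.Set.mem_ofList, h, pvInd, Function.comp]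
    · simp [PySem.Set.mem_ofList, h, pvInd, Function.comp]
  rw [hch, pv_streak, ← pvG_eq_counts]
  rfl

theorem pvB_eq (locations : List (Int × Int)) (sx sy seconds : Int) :
    scan_map_sequential_robots_alt locations (sx, sy) seconds
    = ((locations.foldl (pvStep sy) PySem.Dict.empty).values.map (pvGv sx)).foldl max 0 := by
  simp only [scan_map_sequential_robots_alt]
  rw [show (fun (d : PySem.Dict Int (PySem.Set Int)) (p : Int × Int) =>
      if 0 ≤ p.2 ∧ p.2 < sy then
        d.insert p.2 (PySem.Set.add (d.getD p.2 PySem.Set.empty) p.1)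
      else d) = pvStep sy from rfl]
  exact pv_outerB sx _ 0 le_rfl

theorem pvVK (locations : List (Int × Int)) (sx sy : Int) :
    (locations.foldl (pvStep sy) PySem.Dict.empty).values.map (pvGv sx)
    = (locations.foldl (pvStep sy) PySem.Dict.empty).keys.map (pvF locations sx) := by
  set rows := locations.foldl (pvStep sy) PySem.Dict.empty with hrows
  have hnd : rows.keys.Nodup := pvRows_nodup sy locations _ PySem.Dict.nodup_keys_empty
  show (rows.items.map (·.2)).map (pvGv sx) = (rows.items.map (·.1)).map (pvF locations sx)
  rw [List.map_map, List.map_map]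
  apply List.map_congr_left
  intro pr hpr
  obtain ⟨yk, vset⟩ := pr
  have hy : yk ∈ rows.keys := PySem.Dict.mem_keys_of_mem_items _ hpr
  have hb : 0 ≤ yk ∧ yk < sy := by
    have := (pvRows_keys sy locations PySem.Dict.empty yk).mp (by simpa [hrows] using hy)
    rcases this with hk | ⟨h0, h1, _⟩
    · simp [PySem.Dict.keys_empty] at hk
    · exact ⟨h0, h1⟩
  have hget : rows.getD yk PySem.Set.empty = vset :=
    PySem.Dict.getD_of_mem_items _ hpr hnd _
  show pvGv sx vset = pvF locations sx yk
  unfold pvGv pvF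
  congr 1
  apply List.map_congr_left
  intro x _
  apply decide_eq_decide.mpr
  rw [← hget, hrows, pvRows_mem sy locations PySem.Dict.empty yk x hb.1 hb.2]
  simp [PySem.Dict.getD_empty, PySem.Set.empty]

theorem pvKR (locations : List (Int × Int)) (sx sy : Int) :
    ((PySem.List.pyRange 0 sy 1).map (pvF locations sx)).foldl max 0
    = ((locations.foldl (pvStep sy) PySem.Dict.empty).keys.map (pvF locations sx)).foldl max 0 := by
  set rows := locations.foldl (pvStep sy) PySem.Dict.empty with hrows
  have hnd : rows.keys.Nodup := pvRows_nodup sy locations _ PySem.Dict.nodup_keys_empty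
  set P : Int → Bool := fun y => decide (y ∈ rows.keys) with hP
  have hkeysmem : ∀ y, y ∈ rows.keys ↔ (0 ≤ y ∧ y < sy ∧ ∃ x, (x, y) ∈ locations) := by
    intro y
    rw [hrows, pvRows_keys sy locations PySem.Dict.empty y]
    simp [PySem.Dict.keys_empty]
  have hsplit := List.filter_append_perm P (PySem.List.pyRange 0 sy 1)
  rw [← List.Perm.foldl_op_eq (hsplit.map (pvF locations sx))]
  rw [List.map_append, List.foldl_append]
  have hle : (((PySem.List.pyRange 0 sy 1).filter (fun y => !P y)).map (pvF locations sx)).foldl max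
      ((((PySem.List.pyRange 0 sy 1).filter P).map (pvF locations sx)).foldl max 0)
      = (((PySem.List.pyRange 0 sy 1).filter P).map (pvF locations sx)).foldl max 0 := by
    apply pv_foldl_max_le
    intro v hv
    rcases List.mem_map.mp hv with ⟨y, hyf, rfl⟩
    rcases List.mem_filter.mp hyf with ⟨hyr, hnp⟩
    have hnk : y ∉ rows.keys := by
      intro hk
      rw [hP] at hnp
      simp [hk] at hnp
    have h0 : pvF locations sx y = 0 := by
      unfold pvF
      apply pvG_false
      intro b hbm
      rcases List.mem_map.mp hbm with ⟨x, _, rfl⟩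
      by_contra hbt
      have hx : (x, y) ∈ locations := of_decide_eq_true (Bool.of_not_eq_false hbt)
      have hyb := PySem.List.mem_pyRange_one.mp hyr
      exact hnk ((hkeysmem y).mpr ⟨hyb.1, hyb.2, x, hx⟩)
    rw [h0]
    exact (PySem.List.le_foldl_max _ _).1
  rw [hle]
  have hperm : ((PySem.List.pyRange 0 sy 1).filter P).Perm rows.keys := by
    rw [List.perm_ext_iff_of_nodup ((PySem.List.nodup_pyRange_one 0 sy).filter _) hnd]
    intro y
    rw [List.mem_filter]
    constructor
    · rintro ⟨_, hp⟩
      exact of_decide_eq_true hp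
    · intro hk
      refine ⟨?_, decide_eq_true hk⟩
      have := (hkeysmem y).mp hk
      exact PySem.List.mem_pyRange_one.mpr ⟨this.1, this.2.1⟩
  exact List.Perm.foldl_op_eq (hperm.map (pvF locations sx))

theorem pv_main (locations : List (Int × Int)) (map_size : Int × Int) (seconds : Int) :
    scan_map_sequential_robots locations map_size seconds
    = scan_map_sequential_robots_alt locations map_size seconds := by
  obtain ⟨sx, sy⟩ := map_size
  rw [pvA_eq, pvB_eq, pvVK locations sx sy, pvKR locations sx sy]

-- ===== VERDICT (by name: the statement is the Claim_ definition above) =====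
theorem scan_map_sequential_robots_spec : Claim_equal_scan_map_sequential_robots := by
  intro locations map_size seconds _
  unfold Spec_scan_map_sequential_robots
  exact pv_main locations map_size seconds
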